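-- pv_equiv track=rewrite | github.com/hidehic0/library | code/main.py | coordinates_to_id
-- ===== SOURCE A (Python) =====
-- def coordinates_to_id(h: int, w: int) -> tuple[list[list[int]], list[tuple[int, int]]]:
--     """座標を一次元のindexに変換する関数
--
--     返り値は、
--     最初のが、座標からid
--     二つめのが、idから座標
--     です
--     """
--     ItC = [[-1] * w for _ in [0] * h]
--     CtI = [(-1, -1) for _ in [0] * (h * w)]
--
--     i = 0
--
--     for x in range(h):
--         for y in range(w):
--             ItC[x][y] = i
--             CtI[i] = (x, y)
--             i += 1
--
--     return CtI, ItC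
-- ===== SOURCE B (Python) =====
-- def coordinates_to_id(h: int, w: int) -> tuple[list[list[int]], list[tuple[int, int]]]:
--     """座標を一次元のindexに変換する関数 — one flat id range sliced into rows; coordinates read back off the grid by enumeration."""
--     flat = list(range(h * w))
--     ItC = [flat[x * w : x * w + w] for x in range(h)]
--     CtI = [(x, y) for x, row in enumerate(ItC) for y, _ in enumerate(row)]
--     return CtI, ItC
-- ===== Notes on version B (the rewrite author's own statement) =====
-- stated objective: alternative
-- what changed: Instead of a counter-driven nested loop mutating two pre-allocated tables, B materialises one flat id range once, slices it into w-sized rows to form ItC, and derives CtI by enumerating the built grid (no index arithmetic, no shared counter).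
-- intended difference: When both h and w are negative (so h*w > 0) A's loops never run and it returns CtI still filled with the leftover (-1,-1) placeholder sentinels; B returns two empty tables, which on this unspecified negative-dimension corner is at least as intended as A's leftover initialisation values. — e.g. on coordinates_to_id(-1, -1): A returns ([((-1), (-1))], []), B returns ([], [])
import Mathlib
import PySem

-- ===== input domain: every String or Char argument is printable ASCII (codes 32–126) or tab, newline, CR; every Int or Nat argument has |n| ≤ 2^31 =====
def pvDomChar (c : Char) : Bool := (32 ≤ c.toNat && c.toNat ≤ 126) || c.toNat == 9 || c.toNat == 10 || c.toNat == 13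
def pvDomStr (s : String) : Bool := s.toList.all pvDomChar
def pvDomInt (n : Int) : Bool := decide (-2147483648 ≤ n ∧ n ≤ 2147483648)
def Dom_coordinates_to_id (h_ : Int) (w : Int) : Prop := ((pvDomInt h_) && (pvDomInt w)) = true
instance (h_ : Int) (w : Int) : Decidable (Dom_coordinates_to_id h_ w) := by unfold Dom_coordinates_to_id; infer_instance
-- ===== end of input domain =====

-- B replaces A's counter-driven nested loop mutating two pre-allocated tables by a different
-- construction: one flat id range, sliced into w-sized rows for ItC, with CtI read back off the
-- built grid by enumeration (objective: alternative).

-- ===== PORT A =====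
-- body of A's inner loop: ItC[x][y] = i; CtI[i] = (x, y); i += 1.
-- Python lists are mutable arrays, so the two tables are Arrays while the loop runs
-- (x, y, i are loop indices / a counter, nonnegative whenever the loop body runs, so .toNat is the exact Python index)
def stepA (x : Int) (st : Array (Array Int) × Array (Int × Int) × Int) (y : Int) :
    Array (Array Int) × Array (Int × Int) × Int :=
  (st.1.modify x.toNat (fun row => row.setIfInBounds y.toNat st.2.2),
   st.2.1.setIfInBounds st.2.2.toNat (x, y),
   st.2.2 + 1)

-- the two nested loops over the initial state (ItC, CtI, i = 0);
-- [-1] * w and [0] * h: Python list repetition clamps a negative count to 0, exactly as .toNat does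
def loopA (h_ : Int) (w : Int) : Array (Array Int) × Array (Int × Int) × Int :=
  (PySem.List.pyRange 0 h_ 1).foldl
    (fun st x => (PySem.List.pyRange 0 w 1).foldl (stepA x) st)
    (Array.replicate h_.toNat (Array.replicate w.toNat (-1)),
     Array.replicate (h_ * w).toNat ((-1 : Int), (-1 : Int)),
     (0 : Int))

def coordinates_to_id (h_ : Int) (w : Int) : (List (Int × Int)) × List (List Int) :=
  ((loopA h_ w).2.1.toList, (loopA h_ w).1.toList.map Array.toList)

-- ===== PORT B =====
-- flat = list(range(h*w)); ItC = [flat[x*w : x*w+w] for x in range(h)];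
-- CtI = [(x, y) for x, row in enumerate(ItC) for y, _ in enumerate(row)]
def coordinates_to_id_alt (h_ : Int) (w : Int) : (List (Int × Int)) × List (List Int) :=
  let flat := PySem.List.pyRange 0 (h_ * w) 1
  let itc := (PySem.List.pyRange 0 h_ 1).map
    (fun x => PySem.List.slice flat (some (x * w)) (some (x * w + w)))
  let cti := (PySem.List.enumerate itc 0).flatMap
    (fun p => (PySem.List.enumerate p.2 0).map (fun q => (p.1, q.1)))
  (cti, itc)

-- ===== PRECONDITION & SPEC =====
-- When both h and w are negative (so h*w > 0), A's loops never run and it returns a CtI still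
-- filled with the leftover (-1, -1) placeholder sentinels; B returns two empty tables. Grid
-- dimensions are nonnegative, so this corner is unspecified and B's empty tables are at least
-- as intended as A's leftover initialisation values.
def D_coordinates_to_id (h_ : Int) (w : Int) : Prop := h_ < 0 ∧ w < 0
instance (h_ : Int) (w : Int) : Decidable (D_coordinates_to_id h_ w) := by unfold D_coordinates_to_id; infer_instance

def Spec_coordinates_to_id (h_ : Int) (w : Int) (out : (List (Int × Int)) × List (List Int)) : Prop :=
  ¬ D_coordinates_to_id h_ w → out = coordinates_to_id_alt h_ w
instance (h_ : Int) (w : Int) (out : (List (Int × Int)) × List (List Int)) : Decidable (Spec_coordinates_to_id h_ w out) := by unfold Spec_coordinates_to_id; infer_instance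

def pvDiffWitness_coordinates_to_id : Int × Int := (-1, -1)
def pvDiffWitnessOut_coordinates_to_id :
    ((List (Int × Int)) × List (List Int)) × ((List (Int × Int)) × List (List Int)) :=
  (([((-1), (-1))], []), ([], []))

-- ===== CLAIM (what is proved, stated in full; the proofs are below) =====
def Claim_unchanged_coordinates_to_id : Prop := ∀ (h_ : Int) (w : Int), Dom_coordinates_to_id h_ w → Spec_coordinates_to_id h_ w (coordinates_to_id h_ w)
def Claim_changed_coordinates_to_id : Prop := Dom_coordinates_to_id (pvDiffWitness_coordinates_to_id.1) (pvDiffWitness_coordinates_to_id.2) ∧ D_coordinates_to_id (pvDiffWitness_coordinates_to_id.1) (pvDiffWitness_coordinates_to_id.2) ∧ coordinates_to_id (pvDiffWitness_coordinates_to_id.1) (pvDiffWitness_coordinates_to_id.2) = pvDiffWitnessOut_coordinates_to_id.1 ∧ coordinates_to_id_alt (pvDiffWitness_coordinates_to_id.1) (pvDiffWitness_coordinates_to_id.2) = pvDiffWitnessOut_coordinates_to_id.2 ∧ pvDiffWitnessOut_coordinates_to_id.1 ≠ pvDiffWitnessOut_coordinates_to_id.2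
def Claim_exact_coordinates_to_id : Prop := ∀ (h_ : Int) (w : Int), Dom_coordinates_to_id h_ w → D_coordinates_to_id h_ w → coordinates_to_id h_ w ≠ coordinates_to_id_alt h_ w

-- ===== LEMMAS AND PROOFS =====

-- list-level model of A's loop, used only by the proofs
def stepL (x : Int) (st : List (List Int) × List (Int × Int) × Int) (y : Int) :
    List (List Int) × List (Int × Int) × Int :=
  (st.1.set x.toNat ((st.1.getD x.toNat []).set y.toNat st.2.2),
   st.2.1.set st.2.2.toNat (x, y),
   st.2.2 + 1)

def absSt (st : Array (Array Int) × Array (Int × Int) × Int) :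
    List (List Int) × List (Int × Int) × Int :=
  (st.1.toList.map Array.toList, st.2.1.toList, st.2.2)

lemma step_hom (x : Int) (st : Array (Array Int) × Array (Int × Int) × Int) (y : Int) :
    stepL x (absSt st) y = absSt (stepA x st y) := by
  unfold stepL stepA absSt
  refine Prod.ext ?_ (Prod.ext ?_ rfl)
  · simp only [Array.toList_modify]
    rcases lt_or_ge x.toNat st.1.toList.length with hk | hk
    · rw [List.modify_eq_set_get _ (by simpa using hk), List.map_set,
          Array.toList_setIfInBounds,
          List.getD_eq_getElem _ [] (by simpa using hk), List.getElem_map]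
      simp
    · rw [List.modify_eq_self (by simpa using hk),
          List.set_eq_of_length_le (by simpa using hk)]
  · simp [Array.toList_setIfInBounds]

lemma loop_hom (h_ : Int) (w : Int) :
    absSt (loopA h_ w)
      = (PySem.List.pyRange 0 h_ 1).foldl
          (fun st x => (PySem.List.pyRange 0 w 1).foldl (stepL x) st)
          (List.replicate h_.toNat (List.replicate w.toNat (-1)),
           List.replicate (h_ * w).toNat ((-1 : Int), (-1 : Int)),
           (0 : Int)) := by
  unfold loopA
  rw [← List.foldl_hom absSt (fun st x => ?_)]
  · congr 1
    simp [absSt, Array.toList_replicate]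
  · exact List.foldl_hom absSt (fun st' y => step_hom x st' y)

lemma coordA_eq (h_ : Int) (w : Int) :
    coordinates_to_id h_ w
      = (((PySem.List.pyRange 0 h_ 1).foldl
            (fun st x => (PySem.List.pyRange 0 w 1).foldl (stepL x) st)
            (List.replicate h_.toNat (List.replicate w.toNat (-1)),
             List.replicate (h_ * w).toNat ((-1 : Int), (-1 : Int)),
             (0 : Int))).2.1,
         ((PySem.List.pyRange 0 h_ 1).foldl
            (fun st x => (PySem.List.pyRange 0 w 1).foldl (stepL x) st)
            (List.replicate h_.toNat (List.replicate w.toNat (-1)),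
             List.replicate (h_ * w).toNat ((-1 : Int), (-1 : Int)),
             (0 : Int))).1) := by
  have h := loop_hom h_ w
  unfold coordinates_to_id
  rw [← h]
  rfl

-- range(s) is empty for s ≤ 0
lemma pyRange_nonpos (s : Int) (h : s ≤ 0) : PySem.List.pyRange 0 s 1 = [] := by
  simp [PySem.List.pyRange]; omega

-- writing g j into slot i0 + j for j = 0 .. n-1 replaces the middle segment by (range n).map g
lemma foldl_set_shift {α : Type} (g : Nat → α) :
    ∀ (n : Nat) (i0 : Nat) (l : List α), i0 + n ≤ l.length →
    (List.range n).foldl (fun acc j => acc.set (i0 + j) (g j)) l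
      = l.take i0 ++ (List.range n).map g ++ l.drop (i0 + n) := by
  intro n
  induction n with
  | zero => intro i0 l _; simp
  | succ m ih =>
    intro i0 l hlen
    rw [List.range_succ, List.foldl_append, ih i0 l (by omega)]
    simp only [List.foldl_cons, List.foldl_nil]
    have htk : (l.take i0).length = i0 := by rw [List.length_take]; omega
    have h1 : i0 + m < l.length := by omega
    rw [List.set_append_right _ _ (by simp [htk])]
    rw [List.drop_eq_getElem_cons h1]
    simp only [List.length_append, htk, List.length_map, List.length_range]
    have e1 : i0 + m - (i0 + m) = 0 := by omega
    rw [e1, List.set_cons_zero, List.map_append]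
    simp [List.append_assoc, Nat.add_assoc]

-- same, writing into slot j (i0 = 0)
lemma foldl_set_range {α : Type} (g : Nat → α) (n : Nat) (l : List α) (h : n ≤ l.length) :
    (List.range n).foldl (fun acc j => acc.set j (g j)) l
      = (List.range n).map g ++ l.drop n := by
  have := foldl_set_shift g n 0 l (by omega)
  simpa using this

-- A's inner loop (over y), characterised: fills row k of ItC and slots i0.. of CtI
lemma inner_spec (W : Nat) (k : Nat) :
    ∀ (ItC : List (List Int)) (CtI : List (Int × Int)) (i0 : Nat), k < ItC.length →
    (List.range W).foldl (fun st (j : Nat) => stepL (k : Int) st (j : Int)) (ItC, CtI, ((i0 : Nat) : Int)) =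
      (ItC.set k ((List.range W).foldl (fun r j => r.set j ((i0 + j : Nat) : Int)) (ItC.getD k [])),
       (List.range W).foldl (fun c j => c.set (i0 + j) (((k : Nat) : Int), ((j : Nat) : Int))) CtI,
       ((i0 + W : Nat) : Int)) := by
  induction W with
  | zero =>
    intro ItC CtI i0 hk
    simp only [List.range_zero, List.foldl_nil, Nat.add_zero]
    rw [List.getD_eq_getElem ItC [] hk, List.set_getElem_self]
  | succ m ih =>
    intro ItC CtI i0 hk
    rw [List.range_succ, List.foldl_append, List.foldl_append, List.foldl_append, ih ItC CtI i0 hk]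
    simp only [List.foldl_cons, List.foldl_nil]
    unfold stepL
    have hg : (ItC.set k ((List.range m).foldl (fun r j => r.set j ((i0 + j : Nat) : Int)) (ItC.getD k []))).getD k []
        = (List.range m).foldl (fun r j => r.set j ((i0 + j : Nat) : Int)) (ItC.getD k []) := by
      simp [List.getD_eq_getElem?_getD, hk]
    simp only [Int.toNat_natCast, hg, List.set_set]
    refine Prod.ext ?_ (Prod.ext ?_ ?_) <;> simp <;> try ring_nf

lemma seg_div (W k j : Nat) (hW : 0 < W) (hj : j < W) : (k * W + j) / W = k := by
  rw [show k * W + j = W * k + j from by ring, Nat.mul_add_div hW, Nat.div_eq_of_lt hj]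
  omega

lemma seg_mod (W k j : Nat) (hj : j < W) : (k * W + j) % W = j := by
  rw [Nat.mul_add_mod_self_right, Nat.mod_eq_of_lt hj]

-- A's outer loop, characterised: after k rows the first k rows of ItC and the first k*W slots
-- of CtI carry their final values, the rest still carry the initial placeholders
lemma outer_spec (H W : Nat) (hW : 0 < W) :
    ∀ k, k ≤ H →
    (List.range k).foldl
        (fun st (x : Nat) => (List.range W).foldl (fun st (j : Nat) => stepL (x : Int) st (j : Int)) st)
        (List.replicate H (List.replicate W (-1 : Int)), List.replicate (H*W) ((-1:Int), (-1:Int)), ((0:Nat):Int))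
      = ((List.range k).map (fun r => (List.range W).map (fun j => ((r*W + j : Nat) : Int)))
           ++ List.replicate (H - k) (List.replicate W (-1 : Int)),
         (List.range (k*W)).map (fun i => (((i / W : Nat) : Int), ((i % W : Nat) : Int)))
           ++ List.replicate (H*W - k*W) ((-1:Int), (-1:Int)),
         ((k*W : Nat) : Int)) := by
  intro k
  induction k with
  | zero => intro _; simp
  | succ k ih =>
    intro hk1
    have hk : k < H := by omega
    conv_lhs => rw [List.range_succ]
    rw [List.foldl_append, ih (by omega)]
    simp only [List.foldl_cons, List.foldl_nil]
    set A1 := (List.range k).map (fun r => (List.range W).map (fun j => ((r*W + j : Nat) : Int))) with hA1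
    set B1 := (List.range (k*W)).map (fun i => (((i / W : Nat) : Int), ((i % W : Nat) : Int))) with hB1
    have hA1len : A1.length = k := by simp [hA1]
    have hB1len : B1.length = k * W := by simp [hB1]
    have hItClen : k < (A1 ++ List.replicate (H - k) (List.replicate W (-1 : Int))).length := by
      simp [hA1len]; omega
    rw [inner_spec W k _ _ (k*W) hItClen]
    have hrep : H - k = (H - k - 1) + 1 := by omega
    have hgd : (A1 ++ List.replicate (H - k) (List.replicate W (-1 : Int))).getD k []
        = List.replicate W (-1 : Int) := by
      rw [List.getD_append_right _ _ _ _ (by omega : A1.length ≤ k), hA1len, Nat.sub_self, hrep,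
          List.replicate_succ]
      rfl
    rw [hgd, foldl_set_range _ W _ (by simp), List.drop_replicate, Nat.sub_self, List.replicate_zero, List.append_nil]
    have hsetItC : (A1 ++ List.replicate (H - k) (List.replicate W (-1 : Int))).set k
          ((List.range W).map (fun j => ((k*W + j : Nat) : Int)))
        = (List.range (k+1)).map (fun r => (List.range W).map (fun j => ((r*W + j : Nat) : Int)))
           ++ List.replicate (H - (k+1)) (List.replicate W (-1 : Int)) := by
      rw [List.set_append_right _ _ (by omega), hA1len, Nat.sub_self, hrep, List.replicate_succ,
          List.set_cons_zero, List.range_succ, List.map_append]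
      simp only [List.map_cons, List.map_nil, List.append_assoc, List.singleton_append, hA1]
      congr 3
    have hlenCtI : k*W + W ≤ (B1 ++ List.replicate (H*W - k*W) ((-1:Int), (-1:Int))).length := by
      have h2 : k*W + W ≤ H*W := by
        rw [← Nat.succ_mul]; exact Nat.mul_le_mul_right W hk1
      simp [hB1len]
      omega
    rw [foldl_set_shift _ W (k*W) _ hlenCtI]
    have htake : (B1 ++ List.replicate (H*W - k*W) ((-1:Int), (-1:Int))).take (k*W) = B1 :=
      List.take_left' hB1len
    have hdrop : (B1 ++ List.replicate (H*W - k*W) ((-1:Int), (-1:Int))).drop (k*W + W)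
        = List.replicate (H*W - (k+1)*W) ((-1:Int), (-1:Int)) := by
      rw [List.drop_append, List.drop_eq_nil_of_le (by omega : B1.length ≤ k*W + W), hB1len,
          List.nil_append, Nat.add_sub_cancel_left, List.drop_replicate]
      congr 1
      have : (k+1) * W = k*W + W := by ring
      omega
    have hseg : B1 ++ (List.range W).map (fun j => (((k:Nat) : Int), ((j:Nat) : Int)))
        = (List.range ((k+1)*W)).map (fun i => (((i / W : Nat) : Int), ((i % W : Nat) : Int))) := by
      rw [show (k+1)*W = k*W + W from by ring, List.range_add, List.map_append, List.map_map]
      congr 1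
      apply List.map_congr_left
      intro j hj
      simp only [Function.comp_apply]
      rw [seg_div W k j hW (List.mem_range.mp hj), seg_mod W k j (List.mem_range.mp hj)]
    rw [htake, hdrop, hsetItC, hseg]
    refine Prod.ext rfl (Prod.ext rfl ?_)
    simp only []
    congr 1
    ring

-- ===== B-side lemmas =====

-- enumerate over a mapped list
lemma enumerate_map {α β : Type} (f : α → β) :
    ∀ (l : List α) (s : Int),
    PySem.List.enumerate (l.map f) s = (PySem.List.enumerate l s).map (fun p => (p.1, f p.2)) := by
  intro l
  induction l with
  | nil => intro s; simp [PySem.List.enumerate_nil]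
  | cons a t ih => intro s; simp [PySem.List.enumerate_cons, ih]

-- enumerate of (range n), closed form
lemma enumerate_range (n : Nat) :
    PySem.List.enumerate (List.range n) 0
      = (List.range n).map (fun (k : Nat) => (((k : Nat) : Int), (k : Nat))) := by
  apply List.ext_getElem
  · simp [PySem.List.length_enumerate]
  · intro i h1 h2
    simp [PySem.List.getElem_enumerate]

-- the slice x*w : x*w+w of the flat range, for a row index r < H, W ≤ HW - rW
lemma slice_row (HW W r : Nat) (hle : r * W + W ≤ HW) :
    PySem.List.slice ((List.range HW).map (fun (i : Nat) => (i : Int)))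
        (some ((r : Int) * (W : Int))) (some ((r : Int) * (W : Int) + (W : Int)))
      = (List.range W).map (fun j => ((r * W + j : Nat) : Int)) := by
  have e1 : (r : Int) * (W : Int) = ((r * W : Nat) : Int) := by push_cast; ring
  rw [e1, PySem.List.slice_natCast_add, ← List.map_drop, ← List.map_take]
  rw [List.range_eq_range', List.drop_range', List.take_range'_of_length_ge (by omega),
      List.range'_eq_map_range, List.map_map]
  apply List.map_congr_left
  intro j _
  simp

-- B's CtI of the closed-form grid equals A's divmod list
lemma flat_divmod (H W : Nat) (hW : 0 < W) :
    (List.range H).flatMap (fun (r : Nat) => (List.range W).map (fun (y : Nat) => (((r : Nat) : Int), ((y : Nat) : Int))))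
      = (List.range (H*W)).map (fun i => (((i / W : Nat) : Int), ((i % W : Nat) : Int))) := by
  induction H with
  | zero => simp
  | succ k ih =>
    rw [List.range_succ, List.flatMap_append, ih,
        show (k+1)*W = k*W + W from by ring, List.range_add, List.map_append, List.map_map]
    congr 1
    simp only [List.flatMap_cons, List.flatMap_nil, List.append_nil]
    apply List.map_congr_left
    intro j hj
    simp only [Function.comp_apply]
    rw [seg_div W k j hW (List.mem_range.mp hj), seg_mod W k j (List.mem_range.mp hj)]

-- both dimensions positive: both sides equal the same closed forms
lemma main_pos (h_ w : Int) (hh : 0 < h_) (hw : 0 < w) :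
    coordinates_to_id h_ w = coordinates_to_id_alt h_ w := by
  obtain ⟨H, rfl⟩ : ∃ H : Nat, h_ = (H : Int) := ⟨h_.toNat, (Int.toNat_of_nonneg hh.le).symm⟩
  obtain ⟨W, rfl⟩ : ∃ W : Nat, w = (W : Int) := ⟨w.toNat, (Int.toNat_of_nonneg hw.le).symm⟩
  have hW : 0 < W := by exact_mod_cast hw
  have hmul : ((H : Int)) * W = ((H * W : Nat) : Int) := by push_cast; ring
  -- A's value
  have hloop : ((PySem.List.pyRange 0 (H:Int) 1).foldl
        (fun st x => (PySem.List.pyRange 0 (W:Int) 1).foldl (stepL x) st)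
        (List.replicate (H:Int).toNat (List.replicate (W:Int).toNat (-1)),
         List.replicate ((H:Int) * (W:Int)).toNat ((-1 : Int), (-1 : Int)),
         (0 : Int)))
      = ((List.range H).map (fun r => (List.range W).map (fun j => ((r*W + j : Nat) : Int))),
         (List.range (H*W)).map (fun i => (((i / W : Nat) : Int), ((i % W : Nat) : Int))),
         ((H*W : Nat) : Int)) := by
    rw [hmul, PySem.List.pyRange_zero_natCast, PySem.List.pyRange_zero_natCast, List.foldl_map]
    simp only [Int.toNat_natCast, List.foldl_map]
    have := outer_spec H W hW H (le_refl H)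
    simp only [Nat.sub_self, List.replicate_zero, List.append_nil, Nat.cast_zero] at this
    exact this
  -- B's value
  have hitc : ((PySem.List.pyRange 0 (H:Int) 1).map
        (fun x => PySem.List.slice (PySem.List.pyRange 0 ((H:Int) * (W:Int)) 1)
                    (some (x * (W:Int))) (some (x * (W:Int) + (W:Int)))))
      = (List.range H).map (fun r => (List.range W).map (fun j => ((r*W + j : Nat) : Int))) := by
    rw [hmul, PySem.List.pyRange_zero_natCast, PySem.List.pyRange_zero_natCast, List.map_map]
    apply List.map_congr_left
    intro r hr
    simp only [Function.comp_apply]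
    exact slice_row (H*W) W r (by
      have : r + 1 ≤ H := List.mem_range.mp hr
      calc r*W + W = (r+1)*W := by ring
        _ ≤ H*W := Nat.mul_le_mul_right W this)
  have hcti : ((PySem.List.enumerate
        ((List.range H).map (fun r => (List.range W).map (fun j => ((r*W + j : Nat) : Int)))) 0).flatMap
        (fun p => (PySem.List.enumerate p.2 0).map (fun q => (p.1, q.1))))
      = (List.range (H*W)).map (fun i => (((i / W : Nat) : Int), ((i % W : Nat) : Int))) := by
    rw [enumerate_map, List.flatMap_map, enumerate_range, List.flatMap_map,
        ← flat_divmod H W hW]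
    apply List.flatMap_congr
    intro r _
    rw [enumerate_map, List.map_map, enumerate_range, List.map_map]
    apply List.map_congr_left
    intro y _
    rfl
  show _ = coordinates_to_id_alt _ _
  unfold coordinates_to_id_alt
  simp only []
  rw [coordA_eq, hloop, hitc, hcti]

-- h ≤ 0 with h*w ≤ 0: both sides are (empty, empty)
lemma main_h_nonpos (h_ w : Int) (hh : h_ ≤ 0) (hmul : h_ * w ≤ 0) :
    coordinates_to_id h_ w = coordinates_to_id_alt h_ w := by
  unfold coordinates_to_id_alt
  rw [coordA_eq, pyRange_nonpos h_ hh]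
  simp [Int.toNat_of_nonpos hh, Int.toNat_of_nonpos hmul, PySem.List.enumerate_nil]

-- h > 0 but w ≤ 0: every row is empty, CtI is empty
lemma main_w_nonpos (h_ w : Int) (hh : 0 < h_) (hw : w ≤ 0) :
    coordinates_to_id h_ w = coordinates_to_id_alt h_ w := by
  have hmul : h_ * w ≤ 0 := mul_nonpos_of_nonneg_of_nonpos hh.le hw
  obtain ⟨H, rfl⟩ : ∃ H : Nat, h_ = (H : Int) := ⟨h_.toNat, (Int.toNat_of_nonneg hh.le).symm⟩
  unfold coordinates_to_id_alt
  rw [coordA_eq, pyRange_nonpos w hw, pyRange_nonpos _ hmul, PySem.List.pyRange_zero_natCast]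
  have hsl : ∀ a b : Option Int, PySem.List.slice ([] : List Int) a b = [] := by
    intro a b
    cases a <;> cases b <;> simp [PySem.List.slice]
  simp only [List.foldl_map, List.foldl_nil, List.map_map]
  have hitc : (List.range H).map
      ((fun x => PySem.List.slice ([] : List Int) (some (x * w)) (some (x * w + w))) ∘ (fun n : Nat => (n : Int)))
      = List.replicate H ([] : List Int) := by
    rw [List.eq_replicate_iff]
    constructor
    · simp
    · intro b hb
      obtain ⟨n, _, rfl⟩ := List.mem_map.mp hb
      simp only [Function.comp_apply]
      exact hsl _ _
  rw [hitc]
  have hcti : (PySem.List.enumerate (List.replicate H ([] : List Int)) 0).flatMap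
      (fun p => (PySem.List.enumerate p.2 0).map (fun q => (p.1, q.1))) = [] := by
    apply List.flatMap_eq_nil_iff.mpr
    intro p hp
    obtain ⟨k, hk, rfl⟩ := (PySem.List.mem_enumerate_iff _ _ _).mp hp
    simp [PySem.List.enumerate_nil]
  rw [hcti]
  simp [Int.toNat_of_nonpos hmul, Int.toNat_of_nonpos hw]

-- ===== VERDICT (by name: the statement is the Claim_ definition above) =====
theorem coordinates_to_id_spec : Claim_unchanged_coordinates_to_id := by
  intro h_ w _ hnD
  rcases lt_or_ge 0 h_ with hh | hh
  · rcases lt_or_ge 0 w with hw | hw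
    · exact main_pos h_ w hh hw
    · exact main_w_nonpos h_ w hh (by omega)
  · refine main_h_nonpos h_ w (by omega) ?_
    rcases lt_or_ge h_ 0 with hneg | hzero
    · have hw : 0 ≤ w := by
        by_contra hc
        exact hnD ⟨hneg, by omega⟩
      exact mul_nonpos_of_nonpos_of_nonneg (by omega) hw
    · have : h_ = 0 := by omega
      simp [this]

theorem coordinates_to_id_changed : Claim_changed_coordinates_to_id := by
  unfold Claim_changed_coordinates_to_id
  decide

theorem coordinates_to_id_tight : Claim_exact_coordinates_to_id := by
  intro h_ w _ hD heq
  obtain ⟨hh, hw⟩ := hD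
  have hpos : 1 ≤ h_ * w := by nlinarith
  -- A's CtI is a nonempty replicate, B's is []
  have hA : (coordinates_to_id h_ w).1 = List.replicate (h_ * w).toNat ((-1:Int), (-1:Int)) := by
    rw [coordA_eq, pyRange_nonpos h_ hh.le]
    rfl
  have hB : (coordinates_to_id_alt h_ w).1 = [] := by
    unfold coordinates_to_id_alt
    simp [pyRange_nonpos h_ hh.le, PySem.List.enumerate_nil]
  rw [Prod.ext_iff] at heq
  obtain ⟨h1, _⟩ := heq
  rw [hA, hB] at h1
  have hlen := congrArg List.length h1
  simp at hlen
  omega
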